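-- pv_equiv track=rewrite | github.com/arshtaheri/APPRAISER | conv.py | mask_gen
-- ===== SOURCE A (Python) =====
-- def mask_gen(in_val):
--     in_val_bin = bin(int(in_val)).replace('0b','') #''.join('{:0>8b}'.format(c) for c in struct.pack('!f', in_val))
--     if in_val_bin[0] == '-' :
--         in_val_bin = in_val_bin[1:]
--         x1 = in_val_bin[::-1] #this reverses an array
--         x1 += '1'
--     else:
--         x1 = in_val_bin[::-1]
--     while len(x1) < 16:
--         x1 += '0'
--     in_val_bin1 = x1[::-1]
--     mask_value = '0101011111111111'
--     index = 2  # XOR the fourth character in each string (index 3 since Python uses 0-based indexing)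
--     result = in_val_bin1[:index] + str(int(in_val_bin1[index]) & int(mask_value[index])) + in_val_bin1[index+1:]
--     if result[0] == '1':
--         z = result[1:]
--         new_val = -int(z, 2)
--     else:
--         new_val = int(result, 2)
--     return new_val
-- ===== SOURCE B (Python) =====
-- def mask_gen(in_val):
--     n = int(in_val)
--     m = -n if n < 0 else n
--     if n < 0:
--         m += 1 << m.bit_length()
--     W = max(m.bit_length(), 16)
--     if (m >> (W - 3)) & 1:
--         m -= 1 << (W - 3)
--     if (m >> (W - 1)) & 1:
--         return -(m - (1 << (W - 1)))
--     return m
-- ===== Notes on version B (the rewrite author's own statement) =====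
-- stated objective: simpler
-- what changed: Replaces bin()/string reversal/padding/slicing with pure integer bit arithmetic: clear the bit three places below the top of the (at least 16-bit wide) representation and fold the highest bit into a sign.
import Mathlib
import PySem

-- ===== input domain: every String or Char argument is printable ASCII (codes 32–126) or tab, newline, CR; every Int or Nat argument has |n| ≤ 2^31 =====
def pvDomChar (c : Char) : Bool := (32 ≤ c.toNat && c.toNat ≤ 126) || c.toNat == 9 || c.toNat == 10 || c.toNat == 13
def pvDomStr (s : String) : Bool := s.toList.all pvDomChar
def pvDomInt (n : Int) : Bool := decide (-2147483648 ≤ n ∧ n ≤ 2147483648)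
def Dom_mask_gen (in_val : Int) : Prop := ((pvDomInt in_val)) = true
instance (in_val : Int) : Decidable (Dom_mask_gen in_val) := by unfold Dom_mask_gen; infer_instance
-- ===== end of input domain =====

-- B replaces A's bin()/string reversal/padding/slicing with direct integer bit arithmetic (objective: simpler).

-- ===== PORT A =====
-- int(c) for a binary digit character (A only applies it to '0'/'1')
def d01 (c : Char) : Nat := if c = '1' then 1 else 0

-- int(s, 2) for a string of binary digits (exact on the nonempty '0'/'1' strings A parses)
def toNat2 (xs : List Char) : Nat := xs.foldl (fun a c => 2 * a + d01 c) 0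

-- digits of bin(m) for m > 0 (empty for 0)
def natBin (m : Nat) : List Char :=
  if h : m = 0 then [] else natBin (m / 2) ++ [if m % 2 = 1 then '1' else '0']
decreasing_by exact Nat.div_lt_self (Nat.pos_of_ne_zero h) one_lt_two

-- bin(n).replace('0b','') as a char list
def pyBin (n : Int) : List Char :=
  if n < 0 then '-' :: (if n.natAbs = 0 then ['0'] else natBin n.natAbs)
  else if n.natAbs = 0 then ['0'] else natBin n.natAbs

-- while len(x1) < 16: x1 += '0'
def pad (xs : List Char) : List Char :=
  if xs.length < 16 then pad (xs ++ ['0']) else xs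
termination_by 16 - xs.length
decreasing_by simp; omega

def mask_gen (in_val : Int) : Int :=
  let in_val_bin := pyBin in_val
  -- in_val_bin is never empty, so headD/getD defaults are never used (Python indexes directly)
  let x1 := if in_val_bin.headD ' ' = '-'
            then (in_val_bin.drop 1).reverse ++ ['1']
            else in_val_bin.reverse
  let in_val_bin1 := (pad x1).reverse
  let mask_value := ("0101011111111111" : String).toList
  -- str(int(in_val_bin1[2]) & int(mask_value[2])): the & value is 0 or 1, rendered as a char
  let result := in_val_bin1.take 2
      ++ [if d01 (in_val_bin1.getD 2 ' ') &&& d01 (mask_value.getD 2 ' ') = 1 then '1' else '0']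
      ++ in_val_bin1.drop 3
  if result.headD ' ' = '1' then -(toNat2 (result.drop 1) : Int) else (toNat2 result : Int)

-- ===== PORT B =====
def mask_gen_alt (in_val : Int) : Int :=
  let m0 : Nat := in_val.natAbs                                   -- m = -n if n < 0 else n
  let m1 : Nat := if in_val < 0 then m0 + (1 <<< Nat.size m0) else m0   -- m += 1 << m.bit_length()
  let W : Nat := max (Nat.size m1) 16
  let m2 : Nat := if (m1 >>> (W - 3)) &&& 1 = 1 then m1 - (1 <<< (W - 3)) else m1
  if (m2 >>> (W - 1)) &&& 1 = 1 then -((m2 : Int) - ((1 <<< (W - 1) : Nat) : Int)) else (m2 : Int)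

-- ===== PRECONDITION & SPEC =====
def Spec_mask_gen (in_val : Int) (out : Int) : Prop := out = mask_gen_alt in_val
instance (in_val : Int) (out : Int) : Decidable (Spec_mask_gen in_val out) := by unfold Spec_mask_gen; infer_instance

-- ===== CLAIM (what is proved, stated in full; the proofs are below) =====
def Claim_equal_mask_gen : Prop := ∀ (in_val : Int), Dom_mask_gen in_val → Spec_mask_gen in_val (mask_gen in_val)

-- ===== LEMMAS AND PROOFS =====

def AllBin (xs : List Char) : Prop := ∀ c ∈ xs, c = '0' ∨ c = '1'

lemma foldl_shift (xs : List Char) : ∀ a : Nat,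
    xs.foldl (fun a c => 2 * a + d01 c) a = a * 2 ^ xs.length + toNat2 xs := by
  induction xs with
  | nil => intro a; simp [toNat2]
  | cons c xs ih =>
      intro a
      simp only [List.foldl_cons, toNat2, List.length_cons]
      rw [ih, ih (2 * 0 + d01 c)]
      ring

lemma toNat2_cons (c : Char) (xs : List Char) :
    toNat2 (c :: xs) = d01 c * 2 ^ xs.length + toNat2 xs := by
  simp only [toNat2, List.foldl_cons]
  rw [foldl_shift]
  norm_num
  rfl

lemma toNat2_append (xs ys : List Char) :
    toNat2 (xs ++ ys) = toNat2 xs * 2 ^ ys.length + toNat2 ys := by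
  simp only [toNat2, List.foldl_append]
  rw [foldl_shift]
  rfl

lemma toNat2_lt (xs : List Char) (h : AllBin xs) : toNat2 xs < 2 ^ xs.length := by
  induction xs with
  | nil => simp [toNat2]
  | cons c xs ih =>
      have hc := h c (by simp)
      have ht : AllBin xs := fun d hd => h d (by simp [hd])
      have := ih ht
      rw [toNat2_cons]
      rcases hc with hc | hc <;> simp [d01, hc, pow_succ] <;> omega

lemma size_div2 (n : Nat) (h : n ≠ 0) : Nat.size n = Nat.size (n / 2) + 1 := by
  conv_lhs => rw [← Nat.bit_bodd_div2 n]
  rw [Nat.size_bit (by rw [Nat.bit_bodd_div2]; exact h)]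
  simp [Nat.div2_val]

lemma natBin_spec (n : Nat) :
    toNat2 (natBin n) = n ∧ (natBin n).length = Nat.size n ∧ AllBin (natBin n) := by
  induction n using Nat.strong_induction_on with
  | _ n ih =>
    rw [natBin]
    by_cases h : n = 0
    · simp [h, toNat2, AllBin]
    · obtain ⟨ih1, ih2, ih3⟩ := ih (n / 2) (Nat.div_lt_self (Nat.pos_of_ne_zero h) one_lt_two)
      simp only [h, dite_false]
      refine ⟨?_, ?_, ?_⟩
      · rw [toNat2_append, ih1]
        have hm : n % 2 = 1 ∨ n % 2 = 0 := by omega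
        rcases hm with hm | hm <;> simp [hm, d01, toNat2] <;> omega
      · simp [ih2, size_div2 n h]
      · intro c hc
        rcases List.mem_append.mp hc with hc | hc
        · exact ih3 c hc
        · simp at hc; subst hc; split <;> simp

lemma pad_aux : ∀ (k : Nat) (xs : List Char), 16 - xs.length ≤ k →
    pad xs = xs ++ List.replicate (16 - xs.length) '0' := by
  intro k
  induction k with
  | zero =>
      intro xs h
      rw [pad]
      have h1 : ¬ xs.length < 16 := by omega
      have h2 : 16 - xs.length = 0 := by omega
      simp [h1, h2]
  | succ k ih =>
      intro xs h
      rw [pad]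
      split_ifs with hl
      · rw [ih (xs ++ ['0']) (by simp; omega)]
        have h2 : 16 - xs.length = (16 - (xs ++ ['0']).length) + 1 := by simp; omega
        rw [h2, List.replicate_succ, List.append_assoc]
        rfl
      · have h2 : 16 - xs.length = 0 := by omega
        simp [h2]

lemma pad_eq (xs : List Char) : pad xs = xs ++ List.replicate (16 - xs.length) '0' :=
  pad_aux (16 - xs.length) xs le_rfl

lemma toNat2_replicate_zero (k : Nat) : toNat2 (List.replicate k '0') = 0 := by
  induction k with
  | zero => simp [toNat2]
  | succ k ih => rw [List.replicate_succ, toNat2_cons]; simp [d01, ih]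

lemma toNat2_zeros_append (k : Nat) (xs : List Char) :
    toNat2 (List.replicate k '0' ++ xs) = toNat2 xs := by
  rw [toNat2_append, toNat2_replicate_zero]; simp

-- abstract forms of the two tails (proof-only helpers)
def maskA (F : List Char) : Int :=
  let result := F.take 2 ++ ['0'] ++ F.drop 3
  if result.headD ' ' = '1' then -(toNat2 (result.drop 1) : Int) else (toNat2 result : Int)

def maskB (M W : Nat) : Int :=
  let m2 : Nat := if (M >>> (W - 3)) &&& 1 = 1 then M - (1 <<< (W - 3)) else M
  if (m2 >>> (W - 1)) &&& 1 = 1 then -((m2 : Int) - ((1 <<< (W - 1) : Nat) : Int)) else (m2 : Int)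

lemma div_mod_two (q T k : Nat) (hk : 0 < k) (hT : T < k) : (q * k + T) / k % 2 = q % 2 := by
  rw [mul_comm, Nat.mul_add_div hk, Nat.div_eq_of_lt hT]; simp

lemma bit_lo (A B C K T : Nat) (hK : 0 < K) (hT : T < K) (hC : C ≤ 1) :
    (A * (4 * K) + B * (2 * K) + C * K + T) / K % 2 = C := by
  rw [show A * (4 * K) + B * (2 * K) + C * K + T = (4 * A + 2 * B + C) * K + T from by ring,
    div_mod_two _ _ _ hK hT]
  omega

lemma bit_hi (A B K T : Nat) (hK : 0 < K) (hB : B ≤ 1) (hT : T < K) :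
    (A * (4 * K) + B * (2 * K) + T) / (4 * K) % 2 = A % 2 := by
  have hlt : B * (2 * K) + T < 4 * K := by
    rcases Nat.le_one_iff_eq_zero_or_eq_one.mp hB with rfl | rfl <;> omega
  rw [show A * (4 * K) + B * (2 * K) + T = A * (4 * K) + (B * (2 * K) + T) from by ring,
    div_mod_two _ _ _ (by omega) hlt]


lemma key (F : List Char) (hb : AllBin F) (hlen : 16 ≤ F.length) :
    maskA F = maskB (toNat2 F) F.length := by
  rcases F with _ | ⟨a, _ | ⟨b, _ | ⟨c, t⟩⟩⟩ <;> simp only [List.length] at hlen <;>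
    try omega
  have ha := hb a (by simp)
  have hbb := hb b (by simp)
  have hcc := hb c (by simp)
  have ht : AllBin t := fun d hd => hb d (by simp [hd])
  have hT : toNat2 t < 2 ^ t.length := toNat2_lt t ht
  have hK : (0:Nat) < 2 ^ t.length := Nat.two_pow_pos _
  simp only [maskA, maskB, List.length_cons, List.take, List.drop, List.headD,
    List.cons_append, List.nil_append, List.drop_one, List.tail]
  have e3 : t.length + 1 + 1 + 1 - 3 = t.length := by omega
  have e1 : t.length + 1 + 1 + 1 - 1 = t.length + 2 := by omega
  rw [e3, e1]
  have hAle : d01 a ≤ 1 := by unfold d01; split <;> omega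
  have hBle : d01 b ≤ 1 := by unfold d01; split <;> omega
  have hCle : d01 c ≤ 1 := by unfold d01; split <;> omega
  have hM : toNat2 (a :: b :: c :: t) =
      d01 a * (4 * 2 ^ t.length) + d01 b * (2 * 2 ^ t.length) + d01 c * 2 ^ t.length + toNat2 t := by
    simp only [toNat2_cons, List.length_cons]
    ring
  have hM2 : toNat2 (a :: b :: '0' :: t) =
      d01 a * (4 * 2 ^ t.length) + d01 b * (2 * 2 ^ t.length) + toNat2 t := by
    simp only [toNat2_cons, List.length_cons]
    have : d01 '0' = 0 := by decide
    rw [this]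
    ring
  have hMb : toNat2 (b :: '0' :: t) = d01 b * (2 * 2 ^ t.length) + toNat2 t := by
    simp only [toNat2_cons, List.length_cons]
    have : d01 '0' = 0 := by decide
    rw [this]
    ring
  have p2 : (2:Nat) ^ (t.length + 2) = 4 * 2 ^ t.length := by ring
  simp only [Nat.shiftRight_eq_div_pow, Nat.and_one_is_mod, Nat.shiftLeft_eq, one_mul, hM, p2]
  rw [bit_lo _ _ _ _ _ hK hT hCle]
  by_cases hdc : d01 c = 1
  · rw [if_pos hdc]
    have hm2 : d01 a * (4 * 2 ^ t.length) + d01 b * (2 * 2 ^ t.length) + d01 c * 2 ^ t.length +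
        toNat2 t - 2 ^ t.length =
        d01 a * (4 * 2 ^ t.length) + d01 b * (2 * 2 ^ t.length) + toNat2 t := by
      rw [hdc]; omega
    rw [hm2, bit_hi _ _ _ _ hK hBle hT]
    rcases ha with rfl | rfl
    · rw [if_neg (by decide), if_neg (by simp [d01]), hM2]
    · rw [if_pos rfl, if_pos (by simp [d01]), hMb]
      have : d01 '1' = 1 := by decide
      rw [this]
      push_cast
      omega
  · rw [if_neg hdc]
    have hdc0 : d01 c = 0 := by omega
    have hMz : d01 a * (4 * 2 ^ t.length) + d01 b * (2 * 2 ^ t.length) + d01 c * 2 ^ t.length +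
        toNat2 t = d01 a * (4 * 2 ^ t.length) + d01 b * (2 * 2 ^ t.length) + toNat2 t := by
      rw [hdc0]; omega
    rw [hMz, bit_hi _ _ _ _ hK hBle hT]
    rcases ha with rfl | rfl
    · rw [if_neg (by decide), if_neg (by simp [d01]), hM2]
    · rw [if_pos rfl, if_pos (by simp [d01]), hMb]
      have : d01 '1' = 1 := by decide
      rw [this]
      push_cast
      omega

lemma assembleA (core : List Char) (hb : AllBin core) :
    maskA (List.replicate (16 - core.length) '0' ++ core) =
      maskB (toNat2 core) (max core.length 16) := by
  have hb' : AllBin (List.replicate (16 - core.length) '0' ++ core) := by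
    intro d hd
    rcases List.mem_append.mp hd with hd | hd
    · left; exact List.eq_of_mem_replicate hd
    · exact hb d hd
  have hlen : (List.replicate (16 - core.length) '0' ++ core).length = max core.length 16 := by
    simp; omega
  have h16 : 16 ≤ (List.replicate (16 - core.length) '0' ++ core).length := by
    rw [hlen]; omega
  have h := key _ hb' h16
  rw [toNat2_zeros_append, hlen] at h
  exact h

theorem mask_gen_eq (in_val : Int) : mask_gen in_val = mask_gen_alt in_val := by
  by_cases hneg : in_val < 0
  · -- negative branch
    have hm0 : in_val.natAbs ≠ 0 := Int.natAbs_ne_zero.mpr (by omega)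
    obtain ⟨ht1, ht2, ht3⟩ := natBin_spec in_val.natAbs
    have hpy : pyBin in_val = '-' :: natBin in_val.natAbs := by simp [pyBin, hneg, hm0]
    have hcb : AllBin ('1' :: natBin in_val.natAbs) := by
      intro d hd
      rcases List.mem_cons.mp hd with rfl | hd
      · right; rfl
      · exact ht3 d hd
    have hA : mask_gen in_val =
        maskA (List.replicate (16 - ('1' :: natBin in_val.natAbs).length) '0' ++
          ('1' :: natBin in_val.natAbs)) := by
      simp only [mask_gen, hpy, List.headD_cons, if_true, List.drop_succ_cons, List.drop_zero]
      rw [pad_eq]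
      simp only [List.length_append, List.length_reverse, List.length_cons, List.length_nil,
        List.reverse_append, List.reverse_reverse, List.reverse_replicate, List.reverse_cons,
        List.reverse_nil, List.nil_append, List.singleton_append, Nat.zero_add]
      rw [show d01 (("0101011111111111" : String).toList.getD 2 ' ') = 0 from rfl, Nat.and_zero]
      simp only [maskA]
      norm_num
    have hB : mask_gen_alt in_val =
        maskB (toNat2 ('1' :: natBin in_val.natAbs)) (max ('1' :: natBin in_val.natAbs).length 16) := by
      have hlt : in_val.natAbs < 2 ^ in_val.natAbs.size := Nat.lt_size_self _
      have hm1 : in_val.natAbs + 1 <<< in_val.natAbs.size = 2 ^ in_val.natAbs.size + in_val.natAbs := by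
        rw [Nat.shiftLeft_eq, one_mul]; omega
      have hsz : (in_val.natAbs + 1 <<< in_val.natAbs.size).size = in_val.natAbs.size + 1 := by
        rw [hm1]
        refine le_antisymm ?_ ?_
        · rw [Nat.size_le, pow_succ]; omega
        · exact Nat.lt_size.mpr (by omega)
      have e1 : toNat2 ('1' :: natBin in_val.natAbs) = in_val.natAbs + 1 <<< in_val.natAbs.size := by
        rw [toNat2_cons, ht2, ht1, Nat.shiftLeft_eq]
        have : d01 '1' = 1 := rfl
        rw [this]; omega
      have e2 : ('1' :: natBin in_val.natAbs).length = (in_val.natAbs + 1 <<< in_val.natAbs.size).size := by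
        simp [ht2, hsz]
      rw [e1, e2]
      simp only [mask_gen_alt, maskB, if_pos hneg]
    rw [hA, hB, assembleA _ hcb]
  · -- nonnegative branch
    have hnn : 0 ≤ in_val := by omega
    obtain ⟨ht1, ht2, ht3⟩ := natBin_spec in_val.natAbs
    by_cases hm0 : in_val.natAbs = 0
    · have hpy : pyBin in_val = ['0'] := by simp [pyBin, hneg, hm0]
      have hA : mask_gen in_val = maskA (List.replicate (16 - (['0'] : List Char).length) '0' ++ ['0']) := by
        simp only [mask_gen, hpy, List.headD_cons,
          show (('0' : Char) = '-') ↔ False from by simp, if_false]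
        rw [pad_eq]
        simp only [List.length_append, List.length_reverse, List.length_cons, List.length_nil,
          List.reverse_append, List.reverse_reverse, List.reverse_replicate, List.reverse_cons,
          List.reverse_nil, List.nil_append, List.singleton_append, Nat.zero_add]
        rw [show d01 (("0101011111111111" : String).toList.getD 2 ' ') = 0 from rfl, Nat.and_zero]
        simp only [maskA]
        norm_num
      have hB : mask_gen_alt in_val = maskB (toNat2 ['0']) (max (['0'] : List Char).length 16) := by
        have e1 : toNat2 (['0'] : List Char) = in_val.natAbs := by rw [hm0]; rfl
        have e2 : max ((['0'] : List Char).length) 16 = max in_val.natAbs.size 16 := by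
          rw [hm0, Nat.size_zero]
          rfl
        rw [e1, e2]
        simp only [mask_gen_alt, maskB, if_neg hneg]
      rw [hA, hB, assembleA _ (by intro d hd; left; simpa using hd)]
    · have hA : mask_gen in_val =
          maskA (List.replicate (16 - (natBin in_val.natAbs).length) '0' ++ natBin in_val.natAbs) := by
        have hpy : pyBin in_val = natBin in_val.natAbs := by simp [pyBin, hneg, hm0]
        obtain ⟨h0, t0, hco⟩ := List.exists_cons_of_ne_nil
          (show natBin in_val.natAbs ≠ [] from by
            intro hnil
            have := ht2
            rw [hnil] at this
            have hp : 0 < in_val.natAbs.size := Nat.size_pos.mpr (Nat.pos_of_ne_zero hm0)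
            simp at this
            omega)
        have hh0 := ht3 h0 (by rw [hco]; simp)
        have hhd : (natBin in_val.natAbs).headD ' ' ≠ '-' := by
          rw [hco, List.headD_cons]
          rcases hh0 with rfl | rfl <;> decide
        simp only [mask_gen, hpy, iff_false_intro hhd, if_false]
        rw [pad_eq]
        simp only [List.length_append, List.length_reverse, List.length_cons, List.length_nil,
          List.reverse_append, List.reverse_reverse, List.reverse_replicate, List.reverse_cons,
          List.reverse_nil, List.nil_append, List.singleton_append, Nat.zero_add]
        rw [show d01 (("0101011111111111" : String).toList.getD 2 ' ') = 0 from rfl, Nat.and_zero]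
        simp only [maskA]
        norm_num
      have hB : mask_gen_alt in_val =
          maskB (toNat2 (natBin in_val.natAbs)) (max (natBin in_val.natAbs).length 16) := by
        rw [ht1, ht2]
        simp only [mask_gen_alt, maskB, if_neg hneg]
      rw [hA, hB, assembleA _ ht3]

-- ===== VERDICT (by name: the statement is the Claim_ definition above) =====
theorem mask_gen_spec : Claim_equal_mask_gen := by
  intro n _
  unfold Spec_mask_gen
  exact mask_gen_eq n
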